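-- pv_equiv track=rewrite | github.com/MarvinTai/Quadratic_Sieve | basic_quadratic_sieve.py | generate_factor_base
-- ===== SOURCE A (Python) =====
-- def sieve_of_eratosthenes(limit):
--     sieve = [True] * (limit + 1)
--     sieve[0:2] = [False, False]
--     for num in range(2, int(limit ** 0.5) + 1):
--         if sieve[num]:
--             for multiple in range(num*num, limit+1, num):
--                 sieve[multiple] = False
--     return [p for p, is_prime in enumerate(sieve) if is_prime]
--
-- def legendre_symbol(a, p):
--     # Using Euler’s criterion: a^((p-1)//2) mod p is 1 if residue, p-1 if non-residue.
--     ls = pow(a, (p - 1) // 2, p)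
--     return -1 if ls == p - 1 else ls  # return -1 if ls == p-1 else ls (which is 0 or 1)
--
-- def generate_factor_base(n, B):
--     primes = sieve_of_eratosthenes(B)
--     factor_base = []
--     for p in primes:
--         # We include p if n is a quadratic residue mod p.
--         # Also, ignore p=2 here or handle it separately.
--         if p == 2:
--             # Always include 2 in the factor base.
--             factor_base.append(p)
--         elif legendre_symbol(n, p) == 1:
--             factor_base.append(p)
--     # We also add -1 to the factor base to factor the sign.
--     factor_base.insert(0, -1)
--     return factor_base
-- ===== SOURCE B (Python) =====
-- def _has_no_small_prime_factor(m, primes):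
--     # primes is ascending; only primes p with p*p <= m matter
--     for p in primes:
--         if p * p > m:
--             break
--         if m % p == 0:
--             return False
--     return True
--
-- def generate_factor_base(n, B):
--     # Primes up to B by incremental trial division against the primes found so far.
--     primes = []
--     for m in range(2, B + 1):
--         if _has_no_small_prime_factor(m, primes):
--             primes.append(m)
--     # 2 is always included; an odd prime p is kept when n is a quadratic residue mod p.
--     return [-1] + [p for p in primes if p == 2 or pow(n, (p - 1) // 2, p) == 1]
-- ===== Notes on version B (the rewrite author's own statement) =====
-- stated objective: alternative
-- what changed: Replaces the boolean-array sieve of Eratosthenes by incremental trial division of each candidate against the primes found so far (p*p <= m), and replaces the append-loop with its legendre_symbol helper (-1 remapping) and insert(0,-1) by a single comprehension testing pow(n,(p-1)//2,p)==1 directly, prepending -1.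
import Mathlib
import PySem

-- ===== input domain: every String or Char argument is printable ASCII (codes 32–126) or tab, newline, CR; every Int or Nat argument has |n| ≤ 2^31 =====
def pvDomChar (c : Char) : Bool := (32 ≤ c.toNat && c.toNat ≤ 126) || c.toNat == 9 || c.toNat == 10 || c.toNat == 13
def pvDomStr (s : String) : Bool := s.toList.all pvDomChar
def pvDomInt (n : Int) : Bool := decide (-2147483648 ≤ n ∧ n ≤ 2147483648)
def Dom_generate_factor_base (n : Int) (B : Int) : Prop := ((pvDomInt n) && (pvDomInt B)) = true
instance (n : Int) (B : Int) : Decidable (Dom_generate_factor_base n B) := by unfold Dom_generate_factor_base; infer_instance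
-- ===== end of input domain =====

-- B replaces the sieve of Eratosthenes by incremental trial division against the primes found
-- so far and the append-loop + legendre helper + insert(0,-1) by a single filter on a cons;
-- objective: alternative (a genuinely different algorithm, no speed claim).

-- ===== PORT A =====
-- pow(a, (p-1)//2, p) is PySem.Int.powMod; the exponent (p-1)//2 is ≥ 0 for every p the caller passes (p ≥ 2)
def legendre_symbol (a : Int) (p : Int) : Int :=
  let ls := PySem.Int.powMod a (PySem.Int.floordiv (p - 1) 2).toNat p
  if ls = p - 1 then -1 else ls

-- int(limit ** 0.5) is ported as Nat.sqrt: exact for 0 ≤ limit ≤ 2^31 (the float sqrt of such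
-- ints truncates to isqrt); for limit < 0 Python raises TypeError (complex ** result), excluded by Pre_.
def sieve_of_eratosthenes (limit : Int) : List Int :=
  let sieve0 := List.replicate (limit + 1).toNat true
  -- sieve[0:2] = [False, False]  (slice assignment: replaces the first two slots, extending if needed)
  let sieve1 := false :: false :: sieve0.drop 2
  let sieve2 := (PySem.List.pyRange 2 ((limit.toNat.sqrt : Int) + 1) 1).foldl
    (fun s num =>
      if PySem.List.pyGetD s num false then
        (PySem.List.pyRange (num * num) (limit + 1) num).foldl
          (fun s2 multiple => PySem.List.pySetD s2 multiple false) s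
      else s) sieve1
  ((PySem.List.enumerate sieve2).filter (fun q => q.2)).map (fun q => q.1)

def generate_factor_base (n : Int) (B : Int) : List Int :=
  let primes := sieve_of_eratosthenes B
  let factor_base := primes.foldl
    (fun acc p =>
      if p = 2 then acc ++ [p]
      else if legendre_symbol n p = 1 then acc ++ [p]
      else acc) []
  PySem.List.insert factor_base 0 (-1)

-- ===== PORT B =====
def has_no_small_prime_factor (m : Int) : List Int → Bool
  | [] => true
  | p :: ps =>
    if p * p > m then true
    else if PySem.Int.mod m p == 0 then false
    else has_no_small_prime_factor m ps

def trial_primes (B : Int) : List Int :=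
  (PySem.List.pyRange 2 (B + 1) 1).foldl
    (fun primes m =>
      if has_no_small_prime_factor m primes then primes ++ [m] else primes) []

def generate_factor_base_alt (n : Int) (B : Int) : List Int :=
  (-1) :: (trial_primes B).filter
    (fun p => p == 2 || PySem.Int.powMod n (PySem.Int.floordiv (p - 1) 2).toNat p == 1)

-- ===== PRECONDITION & SPEC =====
-- Pre_ excludes B < 0, where A raises TypeError: (negative) ** 0.5 is complex and int() of it fails.
def Pre_generate_factor_base (n : Int) (B : Int) : Prop := 0 ≤ B
instance (n : Int) (B : Int) : Decidable (Pre_generate_factor_base n B) := by unfold Pre_generate_factor_base; infer_instance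
def pvWitness_generate_factor_base : Int × Int := (7, 20)

def Spec_generate_factor_base (n : Int) (B : Int) (out : List Int) : Prop := out = generate_factor_base_alt n B
instance (n : Int) (B : Int) (out : List Int) : Decidable (Spec_generate_factor_base n B out) := by unfold Spec_generate_factor_base; infer_instance

-- ===== CLAIM (what is proved, stated in full; the proofs are below) =====
def Claim_equal_generate_factor_base : Prop := ∀ (n : Int) (B : Int), Dom_generate_factor_base n B → Pre_generate_factor_base n B → Spec_generate_factor_base n B (generate_factor_base n B)

-- ===== LEMMAS AND PROOFS =====

-- the common reference predicate: the primes, as Ints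
def pvPB (m : Int) : Bool := decide (Nat.Prime m.toNat)

lemma pvPB_iff (m : Int) : pvPB m = true ↔ Nat.Prime m.toNat := by simp [pvPB]

-- primality of m ≥ 2 is "no divisor d with 2 ≤ d and d * d ≤ m", over Int
lemma pvPrime_char (m : Int) (hm : 2 ≤ m) :
    Nat.Prime m.toNat ↔ ∀ d : Int, 2 ≤ d → d * d ≤ m → ¬ d ∣ m := by
  have hmn : m = (m.toNat : Int) := (Int.toNat_of_nonneg (by omega)).symm
  rw [Nat.prime_def_le_sqrt]
  constructor
  · rintro ⟨-, h⟩ d hd hdd hdvd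
    have h2 : (d.toNat : Int) = d := Int.toNat_of_nonneg (by omega)
    refine h d.toNat (by omega) (Nat.le_sqrt.mpr ?_) ?_
    · have : (d.toNat * d.toNat : Int) ≤ (m.toNat : Int) := by rw [h2, ← hmn]; exact hdd
      exact_mod_cast this
    · have : (d.toNat : Int) ∣ (m.toNat : Int) := by rw [h2, ← hmn]; exact hdvd
      exact_mod_cast this
  · intro h
    refine ⟨by omega, fun k hk hks hkd => ?_⟩
    refine h (k : Int) (by exact_mod_cast hk) ?_ ?_
    · have := Nat.le_sqrt.mp hks
      rw [hmn]; exact_mod_cast this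
    · rw [hmn]; exact_mod_cast hkd

-- B's trial-division test against the primes below m decides primality of m
lemma pv_test_eq (m : Int) (hm : 2 ≤ m) (acc : List Int)
    (hacc : acc = (PySem.List.pyRange 2 m 1).filter pvPB) :
    ((acc.filter (fun p => decide (p * p ≤ m))).all
      (fun p => !(PySem.Int.mod m p == 0))) = pvPB m := by
  subst hacc
  rw [Bool.eq_iff_iff]
  simp only [List.all_eq_true, List.mem_filter, PySem.List.mem_pyRange_one,
    decide_eq_true_eq, Bool.not_eq_eq_eq_not, Bool.not_true, beq_eq_false_iff_ne, ne_eq,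
    pvPB_iff, PySem.Int.mod_eq_zero_iff_dvd]
  rw [pvPrime_char m hm]
  constructor
  · intro h d hd hdd hdvd
    set q := d.toNat.minFac with hq
    have hd0 : (d.toNat : Int) = d := Int.toNat_of_nonneg (by omega)
    have hqp : q.Prime := Nat.minFac_prime (by omega)
    have hq2 : 2 ≤ q := hqp.two_le
    have hqle : q ≤ d.toNat := Nat.minFac_le (by omega)
    have hqdvd : (q : Int) ∣ d := by
      rw [← hd0]; exact_mod_cast Nat.minFac_dvd d.toNat
    have hqi2 : (2 : Int) ≤ (q : Int) := by exact_mod_cast hq2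
    have hqled : (q : Int) ≤ d := by rw [← hd0]; exact_mod_cast hqle
    have hqq : (q : Int) * q ≤ m := by nlinarith
    have hqltm : (q : Int) < m := by nlinarith
    have hqPB : Nat.Prime ((q : Int).toNat) := by simpa using hqp
    exact h q ⟨⟨⟨hqi2, hqltm⟩, hqPB⟩, hqq⟩ (hqdvd.trans hdvd)
  · rintro h x ⟨⟨⟨hx2, hxm⟩, hxp⟩, hxx⟩
    exact h x hx2 hxx

-- with an ascending list of positive p, the early break at p * p > m is the filtered all
lemma pv_hnspf_eq (m : Int) (l : List Int) (hpos : ∀ p ∈ l, 0 < p)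
    (hsort : l.Pairwise (· ≤ ·)) :
    has_no_small_prime_factor m l
      = (l.filter (fun p => decide (p * p ≤ m))).all (fun p => !(PySem.Int.mod m p == 0)) := by
  induction l with
  | nil => rfl
  | cons p ps ih =>
    have hp0 : 0 < p := hpos p List.mem_cons_self
    have hsort' : ps.Pairwise (· ≤ ·) := hsort.of_cons
    have hge : ∀ q ∈ ps, p ≤ q := fun q hq => (List.pairwise_cons.mp hsort).1 q hq
    unfold has_no_small_prime_factor
    by_cases hbig : p * p > m
    · rw [if_pos hbig]
      have hfil : (p :: ps).filter (fun p => decide (p * p ≤ m)) = [] := by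
        rw [List.filter_eq_nil_iff]
        intro q hq
        simp only [decide_eq_true_eq]
        rcases List.mem_cons.mp hq with rfl | hq'
        · omega
        · have hpq := hge q hq'
          nlinarith
      rw [hfil]
      rfl
    · rw [if_neg hbig]
      have hkeep : decide (p * p ≤ m) = true := by simp; omega
      rw [List.filter_cons, hkeep]
      simp only [if_true]
      by_cases hdvd : PySem.Int.mod m p == 0
      · rw [if_pos hdvd, List.all_cons, hdvd]
        rfl
      · rw [if_neg hdvd, List.all_cons]
        have : (!(PySem.Int.mod m p == 0)) = true := by
          simp only [Bool.not_eq_eq_eq_not, Bool.not_true]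
          exact Bool.not_eq_true _ ▸ (by simpa using hdvd)
        rw [this, Bool.true_and]
        exact ih (fun q hq => hpos q (List.mem_cons_of_mem p hq)) hsort'

lemma pv_trial_primes_eq (B : Int) :
    trial_primes B = (PySem.List.pyRange 2 (B + 1) 1).filter pvPB := by
  unfold trial_primes
  by_cases hb : B + 1 ≤ 2
  · rw [PySem.List.pyRange_one_eq_nil hb]; rfl
  · have h2 : (2 : Int) ≤ B + 1 := by omega
    refine Int.le_induction (motive := fun b _ =>
      (PySem.List.pyRange 2 b 1).foldl
        (fun primes m =>
          if has_no_small_prime_factor m primes then primes ++ [m] else primes) []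
        = (PySem.List.pyRange 2 b 1).filter pvPB) ?_ ?_ (B + 1) h2
    · beta_reduce
      rw [PySem.List.pyRange_one_eq_nil (by omega)]; rfl
    · intro b hb2 IH
      beta_reduce at IH ⊢
      rw [PySem.List.pyRange_one_succ_right hb2, List.foldl_append, List.filter_append, IH]
      simp only [List.foldl]
      have hpos : ∀ p ∈ (PySem.List.pyRange 2 b 1).filter pvPB, 0 < p := fun p hp => by
        have := (PySem.List.mem_pyRange_one.mp (List.mem_filter.mp hp).1).1
        omega
      have hsort : ((PySem.List.pyRange 2 b 1).filter pvPB).Pairwise (· ≤ ·) :=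
        ((PySem.List.pairwise_lt_pyRange_one 2 b).filter pvPB).imp le_of_lt
      rw [pv_hnspf_eq b _ hpos hsort, pv_test_eq b hb2 _ rfl]
      cases hpb : pvPB b <;> simp [hpb, List.filter]

def pvQ (len : Nat) (b : Int) (j : Nat) : Prop :=
  2 ≤ j ∧ j < len ∧ ∀ d : Int, 2 ≤ d → d < b → d * d ≤ (j : Int) → ¬ d ∣ (j : Int)

def pvStep (L : Nat) (s : List Bool) (num : Int) : List Bool :=
  if PySem.List.pyGetD s num false then
    (PySem.List.pyRange (num * num) ((L : Int) + 1) num).foldl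
      (fun s2 multiple => PySem.List.pySetD s2 multiple false) s
  else s

def pvInv (L : Nat) (b : Int) (S : List Bool) : Prop :=
  S.length = max (L + 1) 2 ∧ ∀ j : Nat, (S.getD j false = true ↔ pvQ (max (L + 1) 2) b j)

lemma pv_pySetD_eq_set (xs : List Bool) (n : Nat) (v : Bool) (h : n < xs.length) :
    PySem.List.pySetD xs (n : Int) v = xs.set n v := by
  simp [PySem.List.pySetD, PySem.List.pySet?, PySem.List.pyIdx?, h]

lemma pv_mark (r : List Int) : ∀ (S : List Bool),
    (∀ x ∈ r, 0 ≤ x ∧ x < (S.length : Int)) →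
    ((r.foldl (fun s m => PySem.List.pySetD s m false) S).length = S.length ∧
     ∀ j : Nat, (r.foldl (fun s m => PySem.List.pySetD s m false) S).getD j false
        = if (j : Int) ∈ r then false else S.getD j false) := by
  induction r with
  | nil => intro S _; simp
  | cons x t ih =>
    intro S hS
    have hx := hS x List.mem_cons_self
    have hxe : ((x.toNat : Int)) = x := Int.toNat_of_nonneg hx.1
    have hxlt : x.toNat < S.length := by omega
    have hset : PySem.List.pySetD S x false = S.set x.toNat false := by
      rw [← hxe]; exact pv_pySetD_eq_set S x.toNat false hxlt
    have hlen : (S.set x.toNat false).length = S.length := by simp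
    obtain ⟨ihlen, ihget⟩ := ih (S.set x.toNat false)
      (fun y hy => by have := hS y (List.mem_cons_of_mem _ hy); omega)
    constructor
    · simpa [List.foldl, hset, hlen] using ihlen
    · intro j
      have hgj := ihget j
      simp only [List.foldl, hset] at hgj ⊢
      rw [hgj]
      by_cases hjt : (j : Int) ∈ t
      · simp [hjt]
      · have hgetset : (S.set x.toNat false).getD j false
            = if j = x.toNat then false else S.getD j false := by
          by_cases hje : j = x.toNat
          · subst hje; simp [List.getD, hxlt]
          · simp [List.getD, hje, Ne.symm hje]
        rw [hgetset]
        by_cases hje : j = x.toNat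
        · subst hje; simp [hxe]
        · have hnm : ((j : Int)) ∉ (x :: t : List Int) := by
            simp only [List.mem_cons, not_or]
            exact ⟨by omega, hjt⟩
          rw [if_neg hje, if_neg hnm, if_neg hjt]

lemma pv_step_inv (L : Nat) (b : Int) (S : List Bool) (hb : 2 ≤ b) (hbL : b ≤ (L : Int))
    (hInv : pvInv L b S) : pvInv L (b + 1) (pvStep L S b) := by
  obtain ⟨hlen, hget⟩ := hInv
  have hL2 : 2 ≤ L := by omega
  have hlen' : S.length = L + 1 := by omega
  have hbe : ((b.toNat : Int)) = b := Int.toNat_of_nonneg (by omega)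
  have hpg : PySem.List.pyGetD S b false = S.getD b.toNat false := by
    have h := PySem.List.pyGetD_natCast S b.toNat false
    rwa [hbe] at h
  unfold pvStep
  rw [hpg]
  by_cases hc : S.getD b.toNat false = true
  · -- b survived: it is "prime so far"; mark its multiples
    rw [if_pos hc]
    have hQb : pvQ (max (L + 1) 2) b b.toNat := (hget b.toNat).mp hc
    have hmemr : ∀ x ∈ PySem.List.pyRange (b * b) ((L : Int) + 1) b,
        0 ≤ x ∧ x < (S.length : Int) := by
      intro x hx
      rw [PySem.List.mem_pyRange_iff_of_pos (by omega)] at hx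
      constructor
      · nlinarith [hx.1]
      · rw [hlen']; push_cast; omega
    obtain ⟨mlen, mget⟩ := pv_mark _ S hmemr
    constructor
    · omega
    · intro j
      rw [mget j]
      have hmem : ((j : Int) ∈ PySem.List.pyRange (b * b) ((L : Int) + 1) b) ↔
          (b ∣ (j : Int) ∧ b * b ≤ (j : Int) ∧ (j : Int) ≤ (L : Int)) := by
        rw [PySem.List.mem_pyRange_iff_of_pos (by omega)]
        constructor
        · rintro ⟨h1, h2, h3⟩
          refine ⟨?_, h1, by omega⟩
          have hbb : b ∣ b * b := dvd_mul_right b b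
          have h4 := dvd_add h3 hbb
          have h5 : (j : Int) - b * b + b * b = (j : Int) := by ring
          rwa [h5] at h4
        · rintro ⟨h1, h2, h3⟩
          exact ⟨h2, by omega, dvd_sub h1 (dvd_mul_right b b)⟩
      by_cases hin : (j : Int) ∈ PySem.List.pyRange (b * b) ((L : Int) + 1) b
      · rw [if_pos hin]
        rw [hmem] at hin
        simp only [Bool.false_eq_true, false_iff]
        unfold pvQ
        rintro ⟨hj2, hjlen, hall⟩
        exact hall b hb (by omega) hin.2.1 hin.1
      · rw [if_neg hin, hget j]
        rw [hmem] at hin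
        unfold pvQ
        constructor
        · rintro ⟨hj2, hjlen, hall⟩
          refine ⟨hj2, hjlen, fun d hd2 hdb hdd hddvd => ?_⟩
          rcases lt_or_eq_of_le (by omega : d ≤ b) with hlt | heq
          · exact hall d hd2 hlt hdd hddvd
          · subst heq
            exact hin ⟨hddvd, hdd, by omega⟩
        · rintro ⟨hj2, hjlen, hall⟩
          exact ⟨hj2, hjlen, fun d hd2 hdb hdd hddvd => hall d hd2 (by omega) hdd hddvd⟩
  · -- b was already crossed out: it has a smaller witness divisor
    rw [if_neg hc]
    have hnQ : ¬ pvQ (max (L + 1) 2) b b.toNat := fun h => hc ((hget b.toNat).mpr h)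
    have hbtn : (2 : Nat) ≤ b.toNat := by omega
    have hbtl : b.toNat < max (L + 1) 2 := by omega
    obtain ⟨e, he2, heb, hee, hedvd⟩ :
        ∃ e : Int, 2 ≤ e ∧ e < b ∧ e * e ≤ b ∧ e ∣ b := by
      unfold pvQ at hnQ
      push Not at hnQ
      obtain ⟨e, h1, h2, h3, h4⟩ := hnQ hbtn hbtl
      exact ⟨e, h1, h2, by omega, by rwa [hbe] at h4⟩
    refine ⟨hlen, fun j => ?_⟩
    rw [hget j]
    unfold pvQ
    constructor
    · rintro ⟨hj2, hjlen, hall⟩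
      refine ⟨hj2, hjlen, fun d hd2 hdb hdd hddvd => ?_⟩
      rcases lt_or_eq_of_le (by omega : d ≤ b) with hlt | heq
      · exact hall d hd2 hlt hdd hddvd
      · subst heq
        have hedj : e ∣ (j : Int) := hedvd.trans hddvd
        have heej : e * e ≤ (j : Int) := by nlinarith
        exact hall e he2 heb heej hedj
    · rintro ⟨hj2, hjlen, hall⟩
      exact ⟨hj2, hjlen, fun d hd2 hdb hdd hddvd => hall d hd2 (by omega) hdd hddvd⟩

lemma pv_init (L : Nat) :
    pvInv L 2 (false :: false :: (List.replicate (L + 1) true).drop 2) := by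
  constructor
  · simp
    omega
  · intro j
    unfold pvQ
    match j with
    | 0 => simp
    | 1 => simp
    | (k + 2) =>
      simp only [List.getD, List.getElem?_cons_succ]
      rw [List.drop_replicate, List.getElem?_replicate]
      by_cases hk : k < L + 1 - 2
      · rw [if_pos hk]
        simp only [Option.getD_some, true_iff]
        exact ⟨by omega, by omega, fun d hd2 hdb _ _ => by omega⟩
      · rw [if_neg hk]
        simp only [Option.getD_none, Bool.false_eq_true, false_iff]
        rintro ⟨-, hlt, -⟩
        omega

lemma pv_fold_inv (L : Nat) (b : Int) (hb : 2 ≤ b) (hbL : b ≤ (L : Int) + 1) :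
    pvInv L b ((PySem.List.pyRange 2 b 1).foldl (pvStep L)
      (false :: false :: (List.replicate (L + 1) true).drop 2)) := by
  refine Int.le_induction (motive := fun b _ => b ≤ (L : Int) + 1 →
    pvInv L b ((PySem.List.pyRange 2 b 1).foldl (pvStep L)
      (false :: false :: (List.replicate (L + 1) true).drop 2))) ?_ ?_ b hb hbL
  · intro _
    rw [PySem.List.pyRange_one_eq_nil (by omega)]
    exact pv_init L
  · intro c hc IH hc1
    rw [PySem.List.pyRange_one_succ_right hc, List.foldl_append]
    simp only [List.foldl]
    exact pv_step_inv L c _ hc (by omega) (IH (by omega))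

lemma pv_final_char (L : Nat) (T : List Bool)
    (hInv : pvInv L ((L.sqrt : Int) + 1) T) :
    ∀ (j : Nat) (h : j < T.length), T[j] = pvPB (j : Int) := by
  obtain ⟨hlen, hget⟩ := hInv
  intro j h
  rw [← List.getD_eq_getElem T false h, Bool.eq_iff_iff, hget j, pvPB_iff]
  have hjt : ((j : Int)).toNat = j := by omega
  unfold pvQ
  constructor
  · rintro ⟨hj2, hjlen, hall⟩
    have hjL : j ≤ L := by omega
    have hchar := pvPrime_char (j : Int) (by exact_mod_cast hj2)
    rw [hjt] at hchar
    rw [hjt, hchar]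
    intro d hd2 hdd hddvd
    have hde : ((d.toNat : Int)) = d := Int.toNat_of_nonneg (by omega)
    have hdL : d.toNat * d.toNat ≤ L := by
      have h1 : d * d ≤ (L : Int) := le_trans hdd (by exact_mod_cast hjL)
      have h2 : ((d.toNat * d.toNat : Nat) : Int) ≤ ((L : Nat) : Int) := by push_cast; rw [hde]; exact h1
      exact_mod_cast h2
    have hds : d.toNat ≤ L.sqrt := Nat.le_sqrt.mpr hdL
    have hdlt : d < (L.sqrt : Int) + 1 := by
      have : ((d.toNat : Int)) ≤ ((L.sqrt : Nat) : Int) := by exact_mod_cast hds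
      omega
    exact hall d hd2 hdlt hdd hddvd
  · intro hp
    have hp' : Nat.Prime ((j : Int)).toNat := by rwa [hjt]
    have hj2 : 2 ≤ j := by rw [hjt] at hp'; exact hp'.two_le
    refine ⟨hj2, by omega, fun d hd2 _ hdd hddvd => ?_⟩
    exact (pvPrime_char (j : Int) (by exact_mod_cast hj2)).mp hp' d hd2 hdd hddvd

lemma pv_enum (T : List Bool) (f : Int → Bool) : ∀ (s : Int),
    (∀ (j : Nat) (h : j < T.length), T[j] = f (s + (j : Int))) →
    ((PySem.List.enumerate T s).filter (fun q => q.2)).map (fun q => q.1)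
      = (PySem.List.pyRange s (s + (T.length : Int)) 1).filter f := by
  induction T with
  | nil =>
    intro s _
    rw [PySem.List.enumerate_nil]
    rw [show s + (([] : List Bool).length : Int) = s by simp]
    rw [PySem.List.pyRange_one_eq_nil le_rfl]
    rfl
  | cons x xs ih =>
    intro s h
    have h0 : x = f s := by
      have := h 0 (by simp)
      simpa using this
    have hr : PySem.List.pyRange s (s + (((x :: xs).length : Nat) : Int)) 1
        = s :: PySem.List.pyRange (s + 1) (s + (((x :: xs).length : Nat) : Int)) 1 := by
      refine PySem.List.pyRange_one_cons ?_
      have : (0 : Int) < (((x :: xs).length : Nat) : Int) := by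
        simp
      omega
    have key : s + (((x :: xs).length : Nat) : Int) = (s + 1) + ((xs.length : Nat) : Int) := by
      simp only [List.length_cons]; push_cast; ring
    have hrec := ih (s + 1) (fun j hj => by
      have hh := h (j + 1) (by simpa using Nat.succ_lt_succ hj)
      have harg : s + ((((j : Nat) + 1 : Nat)) : Int) = s + 1 + ((j : Nat) : Int) := by
        push_cast; ring
      rw [List.getElem_cons_succ] at hh
      rwa [harg] at hh)
    rw [PySem.List.enumerate_cons, hr, key]
    simp only [List.filter_cons]
    cases hfx : f s
    · rw [← h0] at hfx
      subst hfx
      simpa [← h0] using hrec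
    · rw [← h0] at hfx
      subst hfx
      simpa [← h0] using hrec

lemma pv_sieve_eq (B : Int) (hB : 0 ≤ B) :
    sieve_of_eratosthenes B = (PySem.List.pyRange 2 (B + 1) 1).filter pvPB := by
  obtain ⟨L, rfl⟩ : ∃ L : Nat, B = (L : Int) := ⟨B.toNat, (Int.toNat_of_nonneg hB).symm⟩
  by_cases hL0 : L = 0
  · subst hL0
    decide
  · have hL1 : 1 ≤ L := by omega
    unfold sieve_of_eratosthenes
    simp only []
    have h1 : (((L : Int)) + 1).toNat = L + 1 := by omega
    have h2 : ((L : Int)).toNat = L := by omega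
    rw [h1, h2]
    have hstep : (fun (s : List Bool) (num : Int) =>
        if PySem.List.pyGetD s num false then
          (PySem.List.pyRange (num * num) ((L : Int) + 1) num).foldl
            (fun s2 multiple => PySem.List.pySetD s2 multiple false) s
        else s) = pvStep L := rfl
    rw [hstep]
    have hs1 : 0 < L.sqrt := Nat.sqrt_pos.mpr (by omega)
    have hsself : L.sqrt ≤ L := Nat.sqrt_le_self L
    have hInv := pv_fold_inv L ((L.sqrt : Int) + 1) (by omega) (by
      have : ((L.sqrt : Nat) : Int) ≤ ((L : Nat) : Int) := by exact_mod_cast hsself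
      omega)
    set T := (PySem.List.pyRange 2 ((L.sqrt : Int) + 1) 1).foldl (pvStep L)
      (false :: false :: (List.replicate (L + 1) true).drop 2) with hT
    have hTlen : T.length = L + 1 := by
      have := hInv.1
      omega
    rw [pv_enum T pvPB 0 (fun j h => by
      rw [pv_final_char L T hInv j h]
      norm_num)]
    rw [hTlen]
    have hend : (0 : Int) + ((L + 1 : Nat) : Int) = (L : Int) + 1 := by push_cast; ring
    rw [hend]
    rw [PySem.List.pyRange_one_append 0 2 ((L : Int) + 1) (by omega) (by omega)]
    rw [List.filter_append]
    have hsmall : (PySem.List.pyRange 0 2 1).filter pvPB = [] := by decide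
    rw [hsmall, List.nil_append]

-- insert at index 0 is cons
lemma pv_insert_zero (xs : List Int) (v : Int) : PySem.List.insert xs 0 v = v :: xs := by
  simp [PySem.List.insert, PySem.List.sliceIndices]

-- on any p ≥ 2 the two quadratic-residue tests agree
lemma pv_filter_test (n x : Int) (hx : 2 ≤ x) :
    decide (x = 2 ∨ legendre_symbol n x = 1)
      = (x == 2 || PySem.Int.powMod n (PySem.Int.floordiv (x - 1) 2).toNat x == 1) := by
  unfold legendre_symbol
  by_cases h2 : x = 2
  · subst h2; simp
  · simp only []
    by_cases hls : PySem.Int.powMod n (PySem.Int.floordiv (x - 1) 2).toNat x = x - 1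
    · rw [if_pos hls]
      have hne1 : (x - 1 ≠ 1) := by omega
      rw [hls]
      simp [h2, hne1]
    · rw [if_neg hls]
      rw [Bool.eq_iff_iff]
      simp [h2]

-- ===== VERDICT (by name: the statement is the Claim_ definition above) =====
theorem generate_factor_base_spec : Claim_equal_generate_factor_base := by
  intro n B _ hPre
  unfold Pre_generate_factor_base at hPre
  unfold Spec_generate_factor_base generate_factor_base generate_factor_base_alt
  simp only []
  rw [pv_sieve_eq B hPre, pv_trial_primes_eq B]
  rw [PySem.List.foldl_congr_mem' _ _ (fun acc p =>
        if p = 2 ∨ legendre_symbol n p = 1 then acc ++ [p] else acc) []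
      (fun x _ acc => by
        by_cases h1 : x = 2 <;> by_cases h2 : legendre_symbol n x = 1 <;>
          simp [h1, h2])]
  rw [PySem.List.foldl_append_ite_eq_filter]
  rw [pv_insert_zero, List.nil_append]
  congr 1
  refine List.filter_congr (fun x hxmem => ?_)
  have hx2 : 2 ≤ x := by
    have := (List.mem_filter.mp hxmem).1
    exact (PySem.List.mem_pyRange_one.mp this).1
  exact pv_filter_test n x hx2
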